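-- pv_equiv track=rewrite | github.com/Leedefend/sce-backend-odoo | agent_ops/scripts/common.py | pattern_roots
-- ===== SOURCE A (Python) =====
-- from typing import Any, Iterable
--
-- def pattern_roots(patterns: Iterable[str]) -> list[str]:
--     roots: set[str] = set()
--     for pattern in patterns:
--         normalized = pattern.replace("\\", "/").strip()
--         if not normalized:
--             continue
--         literal_parts = []
--         for part in normalized.split("/"):
--             if any(token in part for token in ("*", "?", "[")):
--                 break
--             literal_parts.append(part)
--         if literal_parts:
--             roots.add("/".join(literal_parts))
--     return sorted(roots)
-- ===== SOURCE B (Python) =====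
-- def pattern_roots(patterns):
--     roots = set()
--     for pattern in patterns:
--         normalized = pattern.replace("\\", "/").strip()
--         if not normalized:
--             continue
--         pos = next((i for i, ch in enumerate(normalized) if ch in "*?["), -1)
--         if pos == -1:
--             roots.add(normalized)
--         else:
--             head, sep, _ = normalized[:pos].rpartition("/")
--             if sep:
--                 roots.add(head)
--     return sorted(roots)
-- ===== Notes on version B (the rewrite author's own statement) =====
-- stated objective: idiomatic
-- what changed: Instead of splitting each normalized pattern on '/' and scanning segment-by-segment with a break, B locates the first glob metacharacter with a single enumerate scan and derives the literal root by slicing up to it and taking rpartition('/')'s head.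
import Mathlib
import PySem

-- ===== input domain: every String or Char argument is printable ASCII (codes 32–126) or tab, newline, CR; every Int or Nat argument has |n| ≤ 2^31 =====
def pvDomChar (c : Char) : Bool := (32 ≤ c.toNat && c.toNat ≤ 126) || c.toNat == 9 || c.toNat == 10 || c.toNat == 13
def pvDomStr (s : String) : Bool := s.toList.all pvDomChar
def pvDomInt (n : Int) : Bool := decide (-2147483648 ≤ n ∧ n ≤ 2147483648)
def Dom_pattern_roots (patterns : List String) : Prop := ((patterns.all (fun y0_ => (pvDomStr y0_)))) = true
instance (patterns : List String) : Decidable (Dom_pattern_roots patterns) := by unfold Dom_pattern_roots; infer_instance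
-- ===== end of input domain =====

-- B replaces A's split-on-'/'-then-break segment loop by one enumerate scan for the first glob
-- metacharacter plus rpartition('/'); same return value, stated objective: more idiomatic.

-- ===== PORT A =====
-- the inner 'for part in normalized.split("/"): if any(token in part …): break; literal_parts.append(part)'
def aLiteralParts : List String → List String
  | [] => []
  | part :: rest =>
    if PySem.Str.isIn "*" part || PySem.Str.isIn "?" part || PySem.Str.isIn "[" part then []
    else part :: aLiteralParts rest

-- the body of A's 'for pattern in patterns' loop
def aStep (roots : PySem.Set String) (pattern : String) : PySem.Set String :=
  let normalized := PySem.Str.strip (PySem.Str.replace pattern "\\" "/")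
  if PySem.Str.len normalized = 0 then roots
  else
    -- normalized.split("/"); the separator "/" is non-empty, so split? is always `some`
    let literalParts := aLiteralParts ((PySem.Str.split? normalized "/").getD [])
    if literalParts = [] then roots
    else PySem.Set.add roots (PySem.Str.join "/" literalParts)

def pattern_roots (patterns : List String) : List String :=
  let roots : PySem.Set String := patterns.foldl aStep PySem.Set.empty
  PySem.List.sorted roots (fun x => x) false

-- ===== PORT B =====
-- next((i for i, ch in enumerate(normalized) if ch in "*?["), -1)
def bFirstMeta (s : String) : Int :=
  match s.toList.findIdx? (fun ch => ch == '*' || ch == '?' || ch == '[') with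
  | some i => (i : Int)
  | none => -1

-- s.rpartition("/"): exact for this fixed non-empty one-character separator
def bRpartition (s : String) : String × String × String :=
  let k := PySem.Str.rfind s "/"
  if k = -1 then ("", "", s)
  else (PySem.Str.slice s none (some k), "/", PySem.Str.slice s (some (k + 1)) none)

-- the body of B's 'for pattern in patterns' loop
def bStep (roots : PySem.Set String) (pattern : String) : PySem.Set String :=
  let normalized := PySem.Str.strip (PySem.Str.replace pattern "\\" "/")
  if PySem.Str.len normalized = 0 then roots
  else
    let pos := bFirstMeta normalized
    if pos = -1 then PySem.Set.add roots normalized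
    else
      let r := bRpartition (PySem.Str.slice normalized none (some pos))
      if PySem.Str.len r.2.1 = 0 then roots else PySem.Set.add roots r.1

def pattern_roots_alt (patterns : List String) : List String :=
  let roots : PySem.Set String := patterns.foldl bStep PySem.Set.empty
  PySem.List.sorted roots (fun x => x) false

-- ===== PRECONDITION & SPEC =====
def Spec_pattern_roots (patterns : List String) (out : List String) : Prop := out = pattern_roots_alt patterns
instance (patterns : List String) (out : List String) : Decidable (Spec_pattern_roots patterns out) := by unfold Spec_pattern_roots; infer_instance

-- ===== CLAIM (what is proved, stated in full; the proofs are below) =====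
def Claim_equal_pattern_roots : Prop := ∀ (patterns : List String), Dom_pattern_roots patterns → Spec_pattern_roots patterns (pattern_roots patterns)

-- ===== LEMMAS AND PROOFS =====

def pMeta (c : Char) : Bool := c == '*' || c == '?' || c == '['

-- reference split on '/', structural
def splitSlash : List Char → List (List Char)
  | [] => [[]]
  | c :: l =>
    if c = '/' then [] :: splitSlash l
    else match splitSlash l with
         | [] => [[c]]
         | h :: t => (c :: h) :: t

theorem splitSlash_ne_nil (l : List Char) : splitSlash l ≠ [] := by
  cases l with
  | nil => simp [splitSlash]
  | cons c l =>
    simp only [splitSlash]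
    split
    · simp
    · split <;> simp

theorem splitOn_go_eq (fuel : Nat) : ∀ (l cur : List Char) (acc : List (List Char)),
    l.length < fuel →
    PySem.Chars.splitOn.go ['/'] fuel l cur acc =
      acc.reverse ++ (match splitSlash l with
                      | [] => []
                      | h :: t => (cur.reverse ++ h) :: t) := by
  induction fuel with
  | zero => intro l cur acc h; omega
  | succ f ih =>
    intro l cur acc h
    cases l with
    | nil => simp [PySem.Chars.splitOn.go, splitSlash]
    | cons c r =>
      by_cases hc : c = '/'
      · subst hc
        have hgo : PySem.Chars.splitOn.go ['/'] (f+1) ('/'::r) cur acc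
            = PySem.Chars.splitOn.go ['/'] f r [] (cur.reverse :: acc) := by
          simp [PySem.Chars.splitOn.go, List.isPrefixOf]
        rw [hgo, ih r [] (cur.reverse :: acc) (by simpa using h)]
        obtain ⟨hh, t, hst⟩ := List.exists_cons_of_ne_nil (splitSlash_ne_nil r)
        simp [splitSlash, hst]
      · have hgo : PySem.Chars.splitOn.go ['/'] (f+1) (c::r) cur acc
            = PySem.Chars.splitOn.go ['/'] f r (c::cur) acc := by
          simp [PySem.Chars.splitOn.go, List.isPrefixOf, Ne.symm hc]
        rw [hgo, ih r (c::cur) acc (by simpa using h)]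
        obtain ⟨hh, t, hst⟩ := List.exists_cons_of_ne_nil (splitSlash_ne_nil r)
        simp [splitSlash, hst, hc]

theorem splitOn_eq_splitSlash (l : List Char) : PySem.Chars.splitOn l ['/'] = splitSlash l := by
  unfold PySem.Chars.splitOn
  rw [splitOn_go_eq (l.length + 1) l [] [] (by omega)]
  obtain ⟨hh, t, hst⟩ := List.exists_cons_of_ne_nil (splitSlash_ne_nil l)
  simp [hst]

-- per-string root computations, chars level
def cCollect : List (List Char) → List (List Char)
  | [] => []
  | p :: rest => if p.any pMeta then [] else p :: cCollect rest

def cRootA (s : List Char) : Option (List Char) :=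
  let ps := cCollect (splitSlash s)
  if ps = [] then none else some (PySem.Chars.join ['/'] ps)

def gHead (t : List Char) : Option (List Char) :=
  let k := PySem.Chars.rfind t ['/']
  if k = -1 then none else some (t.take k.toNat)

def cRootB (s : List Char) : Option (List Char) :=
  match s.findIdx? pMeta with
  | none => some s
  | some i => gHead (s.take i)

-- rfind facts
theorem rfind_go_cases (t sub : List Char) : ∀ j : Nat,
    PySem.Chars.rfind.go t sub j = -1 ∨ 0 ≤ PySem.Chars.rfind.go t sub j := by
  intro j
  induction j with
  | zero => simp only [PySem.Chars.rfind.go]; split <;> simp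
  | succ k ih =>
    have : PySem.Chars.rfind.go t sub (k+1)
        = if sub.isPrefixOf (t.drop (k+1)) then ((k:Int)+1) else PySem.Chars.rfind.go t sub k := by
      simp [PySem.Chars.rfind.go]
    rw [this]; split
    · right; positivity
    · exact ih

theorem rfind_cases (t sub : List Char) :
    PySem.Chars.rfind t sub = -1 ∨ 0 ≤ PySem.Chars.rfind t sub :=
  rfind_go_cases t sub t.length

theorem rfind_go_shift (c : Char) (t sub : List Char) : ∀ j : Nat,
    PySem.Chars.rfind.go (c :: t) sub (j + 1) =
      if 0 ≤ PySem.Chars.rfind.go t sub j then PySem.Chars.rfind.go t sub j + 1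
      else if sub.isPrefixOf (c :: t) then 0 else -1 := by
  intro j
  induction j with
  | zero =>
    simp only [PySem.Chars.rfind.go, List.drop_succ_cons, List.drop_zero]
    split_ifs <;> simp_all
  | succ k ih =>
    have hL : PySem.Chars.rfind.go (c :: t) sub (k+2)
        = if sub.isPrefixOf ((c :: t).drop (k+2)) then ((k:Int)+2)
          else PySem.Chars.rfind.go (c :: t) sub (k+1) := by
      have : PySem.Chars.rfind.go (c :: t) sub (k+1+1)
          = if sub.isPrefixOf ((c :: t).drop (k+1+1)) then (((k+1:Nat):Int)+1)
            else PySem.Chars.rfind.go (c :: t) sub (k+1) := by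
        simp [PySem.Chars.rfind.go]
      rw [this]; push_cast; ring_nf
    have hR : PySem.Chars.rfind.go t sub (k+1)
        = if sub.isPrefixOf (t.drop (k+1)) then ((k:Int)+1) else PySem.Chars.rfind.go t sub k := by
      simp [PySem.Chars.rfind.go]
    rw [hL, hR, List.drop_succ_cons]
    by_cases hp : sub.isPrefixOf (t.drop (k+1))
    · have h01 : (0:Int) ≤ (k:Int) + 1 := by positivity
      simp only [hp, h01, if_pos]
      ring
    · simp [hp, ih]

theorem rfind_cons (c : Char) (t : List Char) :
    PySem.Chars.rfind (c :: t) ['/'] =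
      if 0 ≤ PySem.Chars.rfind t ['/'] then PySem.Chars.rfind t ['/'] + 1
      else if c = '/' then 0 else -1 := by
  unfold PySem.Chars.rfind
  have := rfind_go_shift c t ['/'] t.length
  simp only [List.length_cons]
  rw [this]
  by_cases hc : c = '/'
  · simp [hc, List.isPrefixOf]
  · simp [List.isPrefixOf, hc, Ne.symm hc]

theorem gHead_nil : gHead [] = none := by decide

theorem gHead_cons (c : Char) (t : List Char) :
    gHead (c :: t) =
      match gHead t with
      | some h => some (c :: h)
      | none => if c = '/' then some [] else none := by
  unfold gHead
  rw [rfind_cons]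
  rcases rfind_cases t ['/'] with h | h
  · by_cases hc : c = '/' <;> simp [h, hc]
  · have hne : PySem.Chars.rfind t ['/'] ≠ -1 := by omega
    have hne2 : ¬ PySem.Chars.rfind t ['/'] + 1 = -1 := by omega
    have htn : (PySem.Chars.rfind t ['/'] + 1).toNat = (PySem.Chars.rfind t ['/']).toNat + 1 := by
      omega
    simp only [if_pos h, if_neg hne2, if_neg hne, htn, List.take_succ_cons]

-- recurrences for cRootB
theorem cRootB_nil : cRootB [] = some [] := by decide

theorem pMeta_slash : pMeta '/' = false := by decide

theorem cRootB_slash (l : List Char) :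
    cRootB ('/' :: l) = some ((cRootB l).elim [] ('/' :: ·)) := by
  unfold cRootB
  rw [List.findIdx?_cons, pMeta_slash]
  simp only [Bool.false_eq_true, if_false]
  cases hf : l.findIdx? pMeta with
  | none => simp
  | some i =>
    simp only [Option.map_some, List.take_succ_cons, gHead_cons]
    cases hg : gHead (l.take i) <;> simp

theorem cRootB_cons (c : Char) (l : List Char) (hc : c ≠ '/') :
    cRootB (c :: l) = if pMeta c then none else (cRootB l).map (c :: ·) := by
  unfold cRootB
  rw [List.findIdx?_cons]
  by_cases hm : pMeta c
  · simp [hm, gHead_nil]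
  · simp only [hm, Bool.false_eq_true, if_false]
    cases hf : l.findIdx? pMeta with
    | none => simp
    | some i =>
      simp only [Option.map_some, List.take_succ_cons, gHead_cons]
      cases hg : gHead (l.take i) <;> simp [hc]

-- recurrences for cRootA
theorem cRootA_nil : cRootA [] = some [] := by decide

theorem cRootA_slash (l : List Char) :
    cRootA ('/' :: l) = some ((cRootA l).elim [] ('/' :: ·)) := by
  obtain ⟨h, t, hst⟩ := List.exists_cons_of_ne_nil (splitSlash_ne_nil l)
  unfold cRootA
  rw [show splitSlash ('/' :: l) = [] :: splitSlash l from by simp [splitSlash]]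
  rw [hst]
  rw [show cCollect ([] :: h :: t) = [] :: cCollect (h :: t) from by simp [cCollect]]
  cases hps : cCollect (h :: t) with
  | nil => simp [PySem.Chars.join_singleton]
  | cons x xs => simp [PySem.Chars.join_cons_cons]

theorem cRootA_cons (c : Char) (l : List Char) (hc : c ≠ '/') :
    cRootA (c :: l) = if pMeta c then none else (cRootA l).map (c :: ·) := by
  obtain ⟨h, t, hst⟩ := List.exists_cons_of_ne_nil (splitSlash_ne_nil l)
  unfold cRootA
  have hsp : splitSlash (c :: l) = (c :: h) :: t := by simp [splitSlash, hc, hst]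
  rw [hsp, hst]
  by_cases hm : pMeta c
  · have h1 : cCollect ((c :: h) :: t) = [] := by simp [cCollect, hm]
    simp [h1, hm]
  · by_cases hh : h.any pMeta
    · have h1 : cCollect ((c :: h) :: t) = [] := by simp [cCollect, hm, hh]
      have h2 : cCollect (h :: t) = [] := by simp [cCollect, hh]
      simp [h1, h2, hm]
    · have h1 : cCollect ((c :: h) :: t) = (c :: h) :: cCollect t := by
        simp [cCollect, hm, hh]
      have h2 : cCollect (h :: t) = h :: cCollect t := by simp [cCollect, hh]
      rw [h1, h2]
      cases hps : cCollect t with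
      | nil => simp [hm, PySem.Chars.join_singleton]
      | cons x xs => simp [hm, PySem.Chars.join_cons_cons]

theorem cRoot_eq (s : List Char) : cRootA s = cRootB s := by
  induction s with
  | nil => rw [cRootA_nil, cRootB_nil]
  | cons c l ih =>
    by_cases hc : c = '/'
    · subst hc; rw [cRootA_slash, cRootB_slash, ih]
    · rw [cRootA_cons c l hc, cRootB_cons c l hc, ih]

-- string-level option roots (mirror the two ports' per-pattern branches)
def optA (s : String) : Option String :=
  let parts := aLiteralParts ((PySem.Str.split? s "/").getD [])
  if parts = [] then none else some (PySem.Str.join "/" parts)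

def optB (s : String) : Option String :=
  let pos := bFirstMeta s
  if pos = -1 then some s
  else
    let r := bRpartition (PySem.Str.slice s none (some pos))
    if PySem.Str.len r.2.1 = 0 then none else some r.1

theorem isIn_singleton (a : Char) (p : List Char) :
    PySem.Chars.isIn [a] p = p.any (· == a) := by
  cases hb : p.any (· == a) with
  | false =>
    rw [PySem.Chars.isIn_eq_false_iff]
    intro hinf
    have hmem : a ∈ p := hinf.mem (by simp)
    rw [List.any_eq_false] at hb
    exact absurd (by simp : (a == a) = true) (hb a hmem)
  | true =>
    rw [PySem.Chars.isIn_iff_infix]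
    rw [List.any_eq_true] at hb
    obtain ⟨x, hx, hxa⟩ := hb
    rw [beq_iff_eq] at hxa
    subst hxa
    obtain ⟨p1, p2, rfl⟩ := List.append_of_mem hx
    exact ⟨p1, p2, by simp⟩

theorem aParts_eq (ps : List (List Char)) :
    aLiteralParts (ps.map String.ofList) = (cCollect ps).map String.ofList := by
  induction ps with
  | nil => rfl
  | cons p rest ih =>
    have hcond : (PySem.Str.isIn "*" (String.ofList p) || PySem.Str.isIn "?" (String.ofList p)
        || PySem.Str.isIn "[" (String.ofList p)) = p.any pMeta := by
      simp only [PySem.Str.isIn, String.toList_ofList]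
      rw [show ("*" : String).toList = ['*'] from rfl, show ("?" : String).toList = ['?'] from rfl,
          show ("[" : String).toList = ['['] from rfl,
          isIn_singleton, isIn_singleton, isIn_singleton]
      rw [Bool.eq_iff_iff]
      simp only [Bool.or_eq_true, List.any_eq_true, beq_iff_eq, pMeta]
      constructor
      · rintro ((⟨x, hx, rfl⟩ | ⟨x, hx, rfl⟩) | ⟨x, hx, rfl⟩)
        · exact ⟨_, hx, Or.inl (Or.inl rfl)⟩
        · exact ⟨_, hx, Or.inl (Or.inr rfl)⟩
        · exact ⟨_, hx, Or.inr rfl⟩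
      · rintro ⟨x, hx, (rfl | rfl) | rfl⟩
        · exact Or.inl (Or.inl ⟨_, hx, rfl⟩)
        · exact Or.inl (Or.inr ⟨_, hx, rfl⟩)
        · exact Or.inr ⟨_, hx, rfl⟩
    simp only [List.map_cons, aLiteralParts, cCollect, hcond]
    split <;> simp_all

theorem optA_eq (s : String) : optA s = (cRootA s.toList).map String.ofList := by
  unfold optA
  have hsplit : (PySem.Str.split? s "/").getD [] = (splitSlash s.toList).map String.ofList := by
    simp only [PySem.Str.split?, PySem.Chars.split?]
    rw [show ("/" : String).toList = ['/'] from rfl]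
    simp [splitOn_eq_splitSlash]
  rw [hsplit, aParts_eq]
  unfold cRootA
  cases hps : cCollect (splitSlash s.toList) with
  | nil => simp
  | cons x xs =>
    show (if List.map String.ofList (x :: xs) = [] then none
          else some (PySem.Str.join "/" (List.map String.ofList (x :: xs))))
        = Option.map String.ofList
            (if (x :: xs) = [] then none else some (PySem.Chars.join ['/'] (x :: xs)))
    rw [if_neg (by simp : ¬(List.map String.ofList (x :: xs) = [])),
        if_neg (by simp : ¬(x :: xs = []))]
    simp only [Option.map_some, PySem.Str.join]
    rw [show ("/" : String).toList = ['/'] from rfl]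
    rw [show List.map String.toList (List.map String.ofList (x :: xs)) = x :: xs from by
      simp [List.map_map, Function.comp_def]]

theorem optB_eq (s : String) : optB s = (cRootB s.toList).map String.ofList := by
  unfold optB bFirstMeta cRootB
  rw [show (fun ch => ch == '*' || ch == '?' || ch == '[') = pMeta from rfl]
  cases hf : s.toList.findIdx? pMeta with
  | none => simp [String.ofList_toList]
  | some i =>
    have hi : ¬((i : Int) = -1) := by omega
    show (if (i : Int) = -1 then some s
          else
            if PySem.Str.len (bRpartition (PySem.Str.slice s none (some (i : Int)))).2.1 = 0
            then none
            else some (bRpartition (PySem.Str.slice s none (some (i : Int)))).1)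
        = Option.map String.ofList (gHead (s.toList.take i))
    rw [if_neg hi]
    have hslice : PySem.Str.slice s none (some (i : Int)) = String.ofList (s.toList.take i) := by
      simp only [PySem.Str.slice]
      rw [PySem.Chars.slice_eq_listSlice, PySem.List.slice_to _ (by omega : (0:Int) ≤ (i:Int))]
      simp
    rw [hslice]
    generalize s.toList.take i = t
    have hrf : PySem.Str.rfind (String.ofList t) "/" = PySem.Chars.rfind t ['/'] := by
      simp only [PySem.Str.rfind, String.toList_ofList]; rfl
    unfold bRpartition gHead
    rw [hrf]
    rcases rfind_cases t ['/'] with h | h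
    · rw [h]
      norm_num
    · have hne : ¬(PySem.Chars.rfind t ['/'] = -1) := by omega
      rw [if_neg hne, if_neg hne]
      have h1 : PySem.Str.len (("/" : String)) = 1 := by decide
      show (if PySem.Str.len ("/" : String) = 0 then none
            else some (PySem.Str.slice (String.ofList t) none (some (PySem.Chars.rfind t ['/']))))
          = some (String.ofList (t.take (PySem.Chars.rfind t ['/']).toNat))
      rw [h1]
      norm_num
      simp only [PySem.Str.slice]
      rw [String.toList_ofList, PySem.Chars.slice_eq_listSlice, PySem.List.slice_to _ h]

theorem match_optA (roots : PySem.Set String) (s : String) :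
    (if aLiteralParts ((PySem.Str.split? s "/").getD []) = [] then roots
     else PySem.Set.add roots (PySem.Str.join "/" (aLiteralParts ((PySem.Str.split? s "/").getD []))))
    = match optA s with
      | none => roots
      | some v => PySem.Set.add roots v := by
  unfold optA
  by_cases hp : aLiteralParts ((PySem.Str.split? s "/").getD []) = [] <;> simp [hp]

theorem match_optB (roots : PySem.Set String) (s : String) :
    (if bFirstMeta s = -1 then PySem.Set.add roots s
     else
       if PySem.Str.len (bRpartition (PySem.Str.slice s none (some (bFirstMeta s)))).2.1 = 0
       then roots
       else PySem.Set.add roots (bRpartition (PySem.Str.slice s none (some (bFirstMeta s)))).1)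
    = match optB s with
      | none => roots
      | some v => PySem.Set.add roots v := by
  have hB : optB s = (if bFirstMeta s = -1 then some s
      else
        if PySem.Str.len (bRpartition (PySem.Str.slice s none (some (bFirstMeta s)))).2.1 = 0
        then none
        else some (bRpartition (PySem.Str.slice s none (some (bFirstMeta s)))).1) := rfl
  rw [hB]
  by_cases h1 : bFirstMeta s = -1
  · rw [if_pos h1, if_pos h1]
  · rw [if_neg h1, if_neg h1]
    by_cases h2 :
        PySem.Str.len (bRpartition (PySem.Str.slice s none (some (bFirstMeta s)))).2.1 = 0
    · rw [if_pos h2, if_pos h2]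
    · rw [if_neg h2, if_neg h2]

theorem step_eq (roots : PySem.Set String) (s : String) :
    (if PySem.Str.len s = 0 then roots
     else
       if aLiteralParts ((PySem.Str.split? s "/").getD []) = [] then roots
       else PySem.Set.add roots (PySem.Str.join "/" (aLiteralParts ((PySem.Str.split? s "/").getD []))))
    = (if PySem.Str.len s = 0 then roots
       else
         if bFirstMeta s = -1 then PySem.Set.add roots s
         else
           if PySem.Str.len (bRpartition (PySem.Str.slice s none (some (bFirstMeta s)))).2.1 = 0
           then roots
           else PySem.Set.add roots (bRpartition (PySem.Str.slice s none (some (bFirstMeta s)))).1) := by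
  by_cases h0 : PySem.Str.len s = 0
  · rw [if_pos h0, if_pos h0]
  · rw [if_neg h0, if_neg h0, match_optA roots s, match_optB roots s,
        optA_eq, optB_eq, cRoot_eq]

theorem aStep_eq_bStep (acc : PySem.Set String) (p : String) : aStep acc p = bStep acc p :=
  step_eq acc (PySem.Str.strip (PySem.Str.replace p "\\" "/"))

theorem foldl_eq (l : List String) : ∀ acc : PySem.Set String,
    List.foldl aStep acc l = List.foldl bStep acc l := by
  induction l with
  | nil => intro acc; rw [List.foldl_nil, List.foldl_nil]
  | cons p rest ih =>
    intro acc
    rw [List.foldl_cons, List.foldl_cons, aStep_eq_bStep, ih]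

theorem pattern_roots_spec' (patterns : List String) :
    pattern_roots patterns = pattern_roots_alt patterns := by
  unfold pattern_roots pattern_roots_alt
  rw [foldl_eq patterns PySem.Set.empty]

-- ===== VERDICT (by name: the statement is the Claim_ definition above) =====
theorem pattern_roots_spec : Claim_equal_pattern_roots :=
  fun patterns _ => pattern_roots_spec' patterns
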